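-- pv_equiv track=rewrite | github.com/algar-telecom-fic/broadband_internet_analysis | add_edges_routers/main.py | assert_string
-- ===== SOURCE A (Python) =====
-- def assert_string(other, valid):
-- 	s = ''
-- 	for i in other:
-- 		for j in valid:
-- 			if i >= j[0] and i <= j[1]:
-- 				s += i
-- 				break
-- 	if len(s) == 0:
-- 		return 'Invalid input'
-- 	return s
-- ===== SOURCE B (Python) =====
-- def assert_string(other, valid):
--     # Sort the (lo, hi) ranges by lo once, keep running prefix maxima of hi, then decide
--     # membership once per distinct character by binary search; filter through that set.
--     ivs = sorted(((r[0], r[1]) for r in valid), key=lambda p: p[0])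
--     los = []
--     best = []
--     m = None
--     for lo, hi in ivs:
--         los.append(lo)
--         if m is None or hi > m:
--             m = hi
--         best.append(m)
--
--     def covered(c):
--         a, b = 0, len(los)
--         while a < b:
--             mid = (a + b) // 2
--             if los[mid] <= c:
--                 a = mid + 1
--             else:
--                 b = mid
--         return a > 0 and c <= best[a - 1]
--
--     allowed = {c for c in set(other) if covered(c)}
--     s = ''.join(c for c in other if c in allowed)
--     return s if s else 'Invalid input'
-- ===== Notes on version B (the rewrite author's own statement) =====
-- stated objective: faster
-- what changed: Instead of scanning every range for every character, B sorts the (lo, hi) ranges by lo once, builds prefix maxima of hi, decides coverage once per distinct character by binary search, and filters the string through that precomputed set.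
-- outside the precondition, e.g. on assert_string('', [()]): A returns 'Invalid input', B raises IndexError; on assert_string('a', [('a', 'z'), ('x',)]): A returns 'a', B raises IndexError
import Mathlib
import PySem

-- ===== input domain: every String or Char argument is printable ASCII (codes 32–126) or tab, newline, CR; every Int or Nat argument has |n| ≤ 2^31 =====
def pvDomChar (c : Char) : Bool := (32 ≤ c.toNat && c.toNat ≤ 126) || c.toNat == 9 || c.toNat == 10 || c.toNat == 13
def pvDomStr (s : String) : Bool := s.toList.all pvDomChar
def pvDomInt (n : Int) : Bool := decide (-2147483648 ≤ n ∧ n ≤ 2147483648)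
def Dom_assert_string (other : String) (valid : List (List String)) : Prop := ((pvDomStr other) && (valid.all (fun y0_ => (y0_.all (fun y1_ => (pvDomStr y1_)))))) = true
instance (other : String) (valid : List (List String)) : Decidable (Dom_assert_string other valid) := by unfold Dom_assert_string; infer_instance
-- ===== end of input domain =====

-- B sorts the (lo, hi) ranges by lo once, keeps prefix maxima of hi, and binary-searches
-- each character instead of scanning all ranges per character (objective: faster).

-- ===== PORT A =====
-- inner 'for j in valid: if i >= j[0] and i <= j[1]: s += i; break'
def pvInnerA (s : String) (i : String) (valid : List (List String)) : String :=
  match valid with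
  | [] => s
  | j :: rest =>
    if PySem.List.pyGetD j 0 "" ≤ i ∧ i ≤ PySem.List.pyGetD j 1 "" then s ++ i
    else pvInnerA s i rest

def assert_string (other : String) (valid : List (List String)) : String :=
  let s := other.toList.foldl (fun s c => pvInnerA s (String.ofList [c]) valid) ""
  if PySem.Str.len s = 0 then "Invalid input" else s

-- ===== PORT B =====
-- 'm = hi if (m is None or hi > m) else m'
def pvMaxO (m : Option String) (h : String) : String :=
  match m with
  | none => h
  | some v => if h > v then h else v

-- ivs = sorted(((r[0], r[1]) for r in valid), key=lambda p: p[0])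
def pvIvs (valid : List (List String)) : List (String × String) :=
  PySem.List.sorted (valid.map (fun r => (PySem.List.pyGetD r 0 "", PySem.List.pyGetD r 1 ""))) (fun p => p.1) false

-- the 'for lo, hi in ivs' loop body building (los, best, m)
def pvStep (st : List String × List String × Option String) (p : String × String) :
    List String × List String × Option String :=
  let m' := pvMaxO st.2.2 p.2
  (st.1 ++ [p.1], st.2.1 ++ [m'], some m')

-- 'while a < b: mid = (a+b)//2; ...'
def pvBsLoop (los : List String) (c : String) (a b : Nat) : Nat :=
  if _h : a < b then
    let mid := (a + b) / 2
    if PySem.List.pyGetD los (mid : Int) "" ≤ c then pvBsLoop los c (mid + 1) b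
    else pvBsLoop los c a mid
  else a
termination_by b - a
decreasing_by all_goals omega

-- 'a > 0 and c <= best[a-1]'
def pvKeep (los best : List String) (c : String) : Bool :=
  let a := pvBsLoop los c 0 los.length
  decide (0 < a) && decide (c ≤ PySem.List.pyGetD best ((a : Int) - 1) "")

def assert_string_alt (other : String) (valid : List (List String)) : String :=
  let ivs := pvIvs valid
  let st := ivs.foldl pvStep ([], [], none)
  let los := st.1
  let best := st.2.1
  -- allowed = {c for c in set(other) if covered(c)}
  let allowed := PySem.Set.ofList
    ((PySem.Set.ofList other.toList).filter (fun c => pvKeep los best (String.ofList [c])))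
  let out := other.toList.foldl
    (fun out c => if PySem.Set.contains allowed c then out ++ [c] else out) ([] : List Char)
  let s := String.ofList out
  if s = "" then "Invalid input" else s

-- ===== PRECONDITION & SPEC =====
-- Pre_ excludes inputs where some range in `valid` has fewer than 2 entries: Python A raises
-- IndexError there whenever a character reaches that range (and B, which materialises every
-- (r[0], r[1]) pair up front, raises on all of them); on the rest of those inputs (empty
-- `other`, or every character matched earlier) A returns while B's natural code still raises.
def Pre_assert_string (other : String) (valid : List (List String)) : Prop :=
  ∀ r ∈ valid, 2 ≤ r.length
instance (other : String) (valid : List (List String)) : Decidable (Pre_assert_string other valid) := by unfold Pre_assert_string; infer_instance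

def pvWitness_assert_string : String × List (List String) := ("ab", [["a", "c"]])

def Spec_assert_string (other : String) (valid : List (List String)) (out : String) : Prop := out = assert_string_alt other valid
instance (other : String) (valid : List (List String)) (out : String) : Decidable (Spec_assert_string other valid out) := by unfold Spec_assert_string; infer_instance

-- ===== CLAIM (what is proved, stated in full; the proofs are below) =====
def Claim_equal_assert_string : Prop := ∀ (other : String) (valid : List (List String)), Dom_assert_string other valid → Pre_assert_string other valid → Spec_assert_string other valid (assert_string other valid)

-- ===== LEMMAS AND PROOFS =====

-- a character is kept by A iff SOME range contains it
abbrev pvHit (valid : List (List String)) (i : String) : Prop :=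
  ∃ r ∈ valid, PySem.List.pyGetD r 0 "" ≤ i ∧ i ≤ PySem.List.pyGetD r 1 ""

theorem pvInnerA_eq (s i : String) (valid : List (List String)) :
    pvInnerA s i valid = if pvHit valid i then s ++ i else s := by
  induction valid with
  | nil => simp [pvInnerA, pvHit]
  | cons j rest ih =>
    by_cases h : PySem.List.pyGetD j 0 "" ≤ i ∧ i ≤ PySem.List.pyGetD j 1 ""
    · have hh : pvHit (j :: rest) i := ⟨j, by simp, h⟩
      simp only [pvInnerA, if_pos h, if_pos hh]
    · have heq : pvHit (j :: rest) i ↔ pvHit rest i := by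
        constructor
        · rintro ⟨r, hr, hc⟩
          rcases List.mem_cons.mp hr with rfl | hr
          · exact absurd hc h
          · exact ⟨r, hr, hc⟩
        · rintro ⟨r, hr, hc⟩; exact ⟨r, List.mem_cons_of_mem _ hr, hc⟩
      simp only [pvInnerA, if_neg h, ih]
      by_cases h2 : pvHit rest i
      · rw [if_pos h2, if_pos (heq.mpr h2)]
      · rw [if_neg h2, if_neg (fun hx => h2 (heq.mp hx))]

theorem pvFoldA_toList (valid : List (List String)) :
    ∀ (l : List Char) (s : String),
      (l.foldl (fun s c => pvInnerA s (String.ofList [c]) valid) s).toList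
        = l.foldl (fun acc c => if pvHit valid (String.ofList [c]) then acc ++ [c] else acc) s.toList := by
  intro l
  simp only [pvInnerA_eq]
  induction l with
  | nil => intro s; rfl
  | cons c t ih =>
    intro s
    simp only [List.foldl_cons]
    by_cases h : pvHit valid (String.ofList [c])
    · rw [if_pos h, if_pos h, ih]
      congr 1
      simp
    · rw [if_neg h, if_neg h, ih]

-- prefix maxima of the hi components, seeded with m
def pvBests (m : Option String) : List (String × String) → List String
  | [] => []
  | p :: t => pvMaxO m p.2 :: pvBests (some (pvMaxO m p.2)) t

theorem pvBests_length (m : Option String) (ivs : List (String × String)) :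
    (pvBests m ivs).length = ivs.length := by
  induction ivs generalizing m with
  | nil => rfl
  | cons p t ih => simp [pvBests, ih]

def pvFoldM (m : Option String) : List (String × String) → Option String
  | [] => m
  | p :: t => pvFoldM (some (pvMaxO m p.2)) t

theorem pvScan_eq (ivs : List (String × String)) :
    ∀ (la lb : List String) (m : Option String),
      ivs.foldl pvStep (la, lb, m) = (la ++ ivs.map Prod.fst, lb ++ pvBests m ivs, pvFoldM m ivs) := by
  induction ivs with
  | nil => simp [pvBests, pvFoldM]
  | cons p t ih =>
    intro la lb m
    simp only [List.foldl_cons, pvStep, pvBests, pvFoldM, List.map_cons, ih]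
    simp

theorem le_pvMaxO (c h : String) (m : Option String) :
    c ≤ pvMaxO m h ↔ c ≤ h ∨ ∃ v, m = some v ∧ c ≤ v := by
  cases m with
  | none => simp [pvMaxO]
  | some v =>
    simp only [pvMaxO, Option.some.injEq]
    split_ifs with hv
    · constructor
      · intro hc; exact Or.inl hc
      · rintro (hc | ⟨w, rfl, hc⟩)
        · exact hc
        · exact le_of_lt (lt_of_le_of_lt hc hv)
    · rw [not_lt] at hv
      constructor
      · intro hc; exact Or.inr ⟨v, rfl, hc⟩
      · rintro (hc | ⟨w, rfl, hc⟩)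
        · exact le_trans hc hv
        · exact hc

theorem le_pvBests_iff (c : String) :
    ∀ (ivs : List (String × String)) (m : Option String) (i : Nat) (hi : i < (pvBests m ivs).length),
      c ≤ (pvBests m ivs)[i] ↔
        (∃ j, ∃ hj : j < ivs.length, j ≤ i ∧ c ≤ (ivs[j]).2) ∨ (∃ v, m = some v ∧ c ≤ v) := by
  intro ivs
  induction ivs with
  | nil => intro m i hi; simp [pvBests] at hi
  | cons p t ih =>
    intro m i hi
    cases i with
    | zero =>
      simp only [pvBests, List.getElem_cons_zero]
      rw [le_pvMaxO]
      constructor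
      · rintro (hc | hm)
        · exact Or.inl ⟨0, by simp, le_refl 0, hc⟩
        · exact Or.inr hm
      · rintro (⟨j, hj, hji, hc⟩ | hm)
        · interval_cases j
          exact Or.inl hc
        · exact Or.inr hm
    | succ i =>
      have hi' : i < (pvBests (some (pvMaxO m p.2)) t).length := by
        simp only [pvBests, List.length_cons] at hi ⊢
        omega
      simp only [pvBests, List.getElem_cons_succ]
      rw [ih (some (pvMaxO m p.2)) i hi']
      constructor
      · rintro (⟨j, hj, hji, hc⟩ | ⟨v, hv, hc⟩)
        · exact Or.inl ⟨j + 1, by simpa using Nat.succ_lt_succ hj, Nat.succ_le_succ hji, by simpa using hc⟩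
        · rw [Option.some.injEq] at hv
          rw [← hv, le_pvMaxO] at hc
          rcases hc with hc | hm
          · exact Or.inl ⟨0, by simp, Nat.zero_le _, hc⟩
          · exact Or.inr hm
      · rintro (⟨j, hj, hji, hc⟩ | ⟨v, hv, hc⟩)
        · cases j with
          | zero =>
            refine Or.inr ⟨pvMaxO m p.2, rfl, ?_⟩
            rw [le_pvMaxO]
            exact Or.inl (by simpa using hc)
          | succ j =>
            exact Or.inl ⟨j, by simpa using Nat.lt_of_succ_lt_succ hj, Nat.le_of_succ_le_succ hji, by simpa using hc⟩
        · refine Or.inr ⟨pvMaxO m p.2, rfl, ?_⟩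
          rw [le_pvMaxO]
          exact Or.inr ⟨v, hv, hc⟩

theorem pvBsLoop_spec (los : List String) (c : String)
    (hsort : los.Pairwise (· ≤ ·)) :
    ∀ k a b, b - a = k → a ≤ b → b ≤ los.length →
      (∀ j, (hj : j < los.length) → j < a → los[j] ≤ c) →
      (∀ j, (hj : j < los.length) → b ≤ j → ¬ los[j] ≤ c) →
      a ≤ pvBsLoop los c a b ∧ pvBsLoop los c a b ≤ b ∧
      (∀ j, (hj : j < los.length) → j < pvBsLoop los c a b → los[j] ≤ c) ∧
      (∀ j, (hj : j < los.length) → pvBsLoop los c a b ≤ j → ¬ los[j] ≤ c) := by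
  have hpw := List.pairwise_iff_getElem.mp hsort
  intro k
  induction k using Nat.strong_induction_on with
  | _ k IH =>
    intro a b hk hab hbl hlow hhigh
    rw [pvBsLoop]
    by_cases h : a < b
    · rw [dif_pos h]
      simp only
      have hmid1 : a ≤ (a + b) / 2 := by omega
      have hmid2 : (a + b) / 2 < b := by omega
      have hmidl : (a + b) / 2 < los.length := by omega
      rw [PySem.List.pyGetD_natCast, List.getD_eq_getElem _ _ hmidl]
      by_cases hc : los[(a + b) / 2] ≤ c
      · rw [if_pos hc]
        refine (IH (b - ((a + b) / 2 + 1)) (by omega) _ _ rfl (by omega) hbl ?_ hhigh).imp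
          (fun h1 => by omega) (fun h2 => h2)
        intro j hj hja
        rcases Nat.lt_or_ge j a with hja' | hja'
        · exact hlow j hj hja'
        · rcases Nat.lt_or_ge j ((a + b) / 2) with hj2 | hj2
          · exact le_trans (hpw j ((a + b) / 2) hj hmidl hj2) hc
          · have : j = (a + b) / 2 := by omega
            subst this; exact hc
      · rw [if_neg hc]
        refine (IH ((a + b) / 2 - a) (by omega) _ _ rfl (by omega) (by omega) hlow ?_).imp
          (fun h1 => h1) (fun h2 => ⟨by omega, h2.2⟩)
        intro j hj hja
        rcases Nat.lt_or_ge j ((a + b) / 2) with hj2 | hj2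
        · omega
        · rcases Nat.lt_or_ge ((a + b) / 2) j with hj3 | hj3
          · intro hle
            exact hc (le_trans (hpw ((a + b) / 2) j hmidl hj hj3) hle)
          · have : j = (a + b) / 2 := by omega
            subst this; exact hc
    · rw [dif_neg h]
      have hab' : a = b := by omega
      subst hab'
      exact ⟨le_refl a, le_refl a, hlow, hhigh⟩

theorem pvKeep_iff (ivs : List (String × String))
    (hsort : (ivs.map Prod.fst).Pairwise (· ≤ ·)) (c : String) :
    pvKeep (ivs.map Prod.fst) (pvBests none ivs) c = true ↔ ∃ p ∈ ivs, p.1 ≤ c ∧ c ≤ p.2 := by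
  have hlen : (ivs.map Prod.fst).length = ivs.length := by simp
  have hblen : (pvBests none ivs).length = ivs.length := pvBests_length none ivs
  obtain ⟨-, hrle, hlo, hhi⟩ :=
    pvBsLoop_spec (ivs.map Prod.fst) c hsort ((ivs.map Prod.fst).length - 0) 0
      (ivs.map Prod.fst).length rfl (Nat.zero_le _) le_rfl
      (fun j hj h => absurd h (by omega)) (fun j hj h => absurd hj (by omega))
  set r := pvBsLoop (ivs.map Prod.fst) c 0 (ivs.map Prod.fst).length with hr
  simp only [pvKeep, Bool.and_eq_true, decide_eq_true_eq, ← hr]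
  constructor
  · rintro ⟨hrpos, hc⟩
    have hr1 : r - 1 < (pvBests none ivs).length := by omega
    rw [show ((r : Int) - 1) = ((r - 1 : Nat) : Int) by omega,
      PySem.List.pyGetD_natCast, List.getD_eq_getElem _ _ hr1] at hc
    rcases (le_pvBests_iff c ivs none (r - 1) hr1).mp hc with ⟨j, hj, hjr, hc2⟩ | ⟨v, hv, -⟩
    · have hjl : j < (ivs.map Prod.fst).length := by omega
      have hc1 := hlo j hjl (by omega)
      rw [List.getElem_map] at hc1
      exact ⟨ivs[j], List.getElem_mem hj, hc1, hc2⟩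
    · cases hv
  · rintro ⟨p, hp, h1, h2⟩
    obtain ⟨j, hj, rfl⟩ := List.mem_iff_getElem.mp hp
    have hjl : j < (ivs.map Prod.fst).length := by omega
    have hjr : j < r := by
      by_contra hle
      exact hhi j hjl (by omega) (by rw [List.getElem_map]; exact h1)
    have hrpos : 0 < r := by omega
    refine ⟨hrpos, ?_⟩
    have hr1 : r - 1 < (pvBests none ivs).length := by omega
    rw [show ((r : Int) - 1) = ((r - 1 : Nat) : Int) by omega,
      PySem.List.pyGetD_natCast, List.getD_eq_getElem _ _ hr1]
    exact (le_pvBests_iff c ivs none (r - 1) hr1).mpr (Or.inl ⟨j, hj, by omega, h2⟩)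

theorem pvKeep_eq_hit (valid : List (List String)) (c : String) :
    pvKeep ((pvIvs valid).map Prod.fst) (pvBests none (pvIvs valid)) c = decide (pvHit valid c) := by
  have hs : ((pvIvs valid).map Prod.fst).Pairwise (· ≤ ·) := by
    rw [List.pairwise_map]
    exact PySem.List.sorted_pairwise _ _
  have hmem : (∃ p ∈ pvIvs valid, p.1 ≤ c ∧ c ≤ p.2) ↔ pvHit valid c := by
    constructor
    · rintro ⟨p, hp, h⟩
      rw [pvIvs, PySem.List.mem_sorted] at hp
      obtain ⟨r, hr, rfl⟩ := List.mem_map.mp hp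
      exact ⟨r, hr, h⟩
    · rintro ⟨r, hr, h⟩
      exact ⟨_, (PySem.List.mem_sorted _ _ _ _).mpr (List.mem_map_of_mem hr), h⟩
  have hiff := (pvKeep_iff (pvIvs valid) hs c).trans hmem
  by_cases h : pvHit valid c
  · rw [hiff.mpr h]
    simp [h]
  · have hf : pvKeep ((pvIvs valid).map Prod.fst) (pvBests none (pvIvs valid)) c = false := by
      rw [Bool.eq_false_iff]
      intro ht
      exact h (hiff.mp ht)
    rw [hf]
    simp [h]

-- ===== VERDICT (by name: the statement is the Claim_ definition above) =====
theorem assert_string_spec : Claim_equal_assert_string := by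
  intro other valid _hdom _hpre
  unfold Spec_assert_string assert_string assert_string_alt
  simp only
  have hset : ∀ (los best : List String) (c : Char),
      PySem.Set.contains (PySem.Set.ofList ((PySem.Set.ofList other.toList).filter
        (fun c => pvKeep los best (String.ofList [c])))) c
      = (decide (c ∈ other.toList) && pvKeep los best (String.ofList [c])) := by
    intro los best c
    by_cases hm : c ∈ other.toList
    · by_cases hk : pvKeep los best (String.ofList [c]) = true
      · have : c ∈ PySem.Set.ofList ((PySem.Set.ofList other.toList).filter
            (fun c => pvKeep los best (String.ofList [c]))) := by
          rw [PySem.Set.mem_ofList, List.mem_filter]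
          exact ⟨(PySem.Set.mem_ofList _ _).mpr hm, hk⟩
        simp [PySem.Set.contains, this, hm, hk]
      · have : c ∉ PySem.Set.ofList ((PySem.Set.ofList other.toList).filter
            (fun c => pvKeep los best (String.ofList [c]))) := by
          rw [PySem.Set.mem_ofList, List.mem_filter]
          rintro ⟨-, hk2⟩
          exact hk hk2
        simp only [Bool.not_eq_true] at hk
        simp [PySem.Set.contains, this, hm, hk]
    · have : c ∉ PySem.Set.ofList ((PySem.Set.ofList other.toList).filter
          (fun c => pvKeep los best (String.ofList [c]))) := by
        rw [PySem.Set.mem_ofList, List.mem_filter]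
        rintro ⟨hc2, -⟩
        exact hm ((PySem.Set.mem_ofList _ _).mp hc2)
      simp [PySem.Set.contains, this, hm]
  rw [pvScan_eq (pvIvs valid) [] [] none]
  simp only [List.nil_append, hset]
  rw [PySem.List.foldl_append_if_eq_filter]
  simp only [List.nil_append]
  rw [List.filter_congr (q := fun c => pvKeep ((pvIvs valid).map Prod.fst) (pvBests none (pvIvs valid)) (String.ofList [c]))
    (by intro x hx; simp [hx])]
  simp only [pvKeep_eq_hit]
  have hA : (other.toList.foldl (fun s c => pvInnerA s (String.ofList [c]) valid) "").toList
      = other.toList.filter (fun ch => decide (pvHit valid (String.ofList [ch]))) := by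
    rw [pvFoldA_toList, PySem.List.foldl_append_ite_eq_filter (fun ch => pvHit valid (String.ofList [ch]))]
    simp
  rw [← hA, String.ofList_toList, PySem.Str.len_eq]
  set sA := other.toList.foldl (fun s c => pvInnerA s (String.ofList [c]) valid) "" with hsA
  have hiff : ((sA.toList.length : Int) = 0) ↔ sA = "" := by
    constructor
    · intro h
      have h0 : sA.toList = [] := List.eq_nil_of_length_eq_zero (by omega)
      calc sA = String.ofList sA.toList := String.ofList_toList.symm
        _ = "" := by rw [h0]
    · intro h
      rw [h]
      rfl
  by_cases h : sA = ""
  · rw [if_pos (hiff.mpr h), if_pos h]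
  · rw [if_neg (fun hx => h (hiff.mp hx)), if_neg h]
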